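-- pv_equiv track=rewrite | github.com/SimonDaNinja/Group7ProjectCode | myApplication.py | IndexRangeFromI
-- ===== SOURCE A (Python) =====
-- def IndexRangeFromI(i,numberOfPoints):
--     lowerIndex = 0
--     ii = 0
--     upperIndex = numberOfPoints - 1
--     numberOfPointsOnInterval = numberOfPoints-1
--     while ii<i:
--         ii += 1
--         lowerIndex += numberOfPointsOnInterval
--         numberOfPointsOnInterval -= 1
--         upperIndex += numberOfPointsOnInterval
--     return range(lowerIndex, upperIndex)
-- ===== SOURCE B (Python) =====
-- def IndexRangeFromI(i, numberOfPoints):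
--     # closed-form triangular-number arithmetic instead of the O(i) loop
--     j = i if i > 0 else 0
--     tri = j * (j - 1) // 2
--     lowerIndex = j * (numberOfPoints - 1) - tri
--     upperIndex = (numberOfPoints - 1) + j * (numberOfPoints - 1) - tri - j
--     return range(lowerIndex, upperIndex)
-- ===== Notes on version B (the rewrite author's own statement) =====
-- stated objective: faster
-- what changed: Replaced the O(i) accumulation loop with closed-form triangular-number formulas for the lower and upper index.
import Mathlib
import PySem

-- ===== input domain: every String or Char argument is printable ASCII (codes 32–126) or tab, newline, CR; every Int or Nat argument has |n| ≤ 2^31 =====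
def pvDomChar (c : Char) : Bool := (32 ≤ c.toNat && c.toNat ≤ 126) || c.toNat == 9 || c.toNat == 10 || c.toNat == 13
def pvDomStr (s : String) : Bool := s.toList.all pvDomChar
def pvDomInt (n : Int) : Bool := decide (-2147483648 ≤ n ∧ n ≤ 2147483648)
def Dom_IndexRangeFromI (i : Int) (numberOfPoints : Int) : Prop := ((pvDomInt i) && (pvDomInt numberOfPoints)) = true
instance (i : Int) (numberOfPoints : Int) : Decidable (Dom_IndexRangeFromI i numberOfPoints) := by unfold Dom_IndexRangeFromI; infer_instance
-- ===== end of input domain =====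

-- B replaces A's O(i) accumulation loop with closed-form triangular-number arithmetic (objective: faster).

-- ===== PORT A =====
-- the while-loop of A, state = (ii, lowerIndex, numberOfPointsOnInterval, upperIndex)
def IndexRangeFromILoop (i ii lowerIndex numberOfPointsOnInterval upperIndex : Int) : Int × Int :=
  if _h : ii < i then
    IndexRangeFromILoop i (ii + 1) (lowerIndex + numberOfPointsOnInterval)
      (numberOfPointsOnInterval - 1) (upperIndex + (numberOfPointsOnInterval - 1))
  else
    (lowerIndex, upperIndex)
termination_by (i - ii).toNat
decreasing_by omega

def IndexRangeFromI (i : Int) (numberOfPoints : Int) : List Int :=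
  let p := IndexRangeFromILoop i 0 0 (numberOfPoints - 1) (numberOfPoints - 1)
  PySem.List.pyRange p.1 p.2 1

-- ===== PORT B =====
def IndexRangeFromI_alt (i : Int) (numberOfPoints : Int) : List Int :=
  let j := if i > 0 then i else 0
  let tri := PySem.Int.floordiv (j * (j - 1)) 2
  let lowerIndex := j * (numberOfPoints - 1) - tri
  let upperIndex := (numberOfPoints - 1) + j * (numberOfPoints - 1) - tri - j
  PySem.List.pyRange lowerIndex upperIndex 1

-- ===== PRECONDITION & SPEC =====
def Spec_IndexRangeFromI (i : Int) (numberOfPoints : Int) (out : List Int) : Prop := out = IndexRangeFromI_alt i numberOfPoints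
instance (i : Int) (numberOfPoints : Int) (out : List Int) : Decidable (Spec_IndexRangeFromI i numberOfPoints out) := by unfold Spec_IndexRangeFromI; infer_instance

-- ===== CLAIM (what is proved, stated in full; the proofs are below) =====
def Claim_equal_IndexRangeFromI : Prop := ∀ (i : Int) (numberOfPoints : Int), Dom_IndexRangeFromI i numberOfPoints → Spec_IndexRangeFromI i numberOfPoints (IndexRangeFromI i numberOfPoints)

-- ===== LEMMAS AND PROOFS =====

-- triangular numbers 0, 0, 1, 3, 6, …
def triI : Nat → Int
  | 0 => 0
  | n + 1 => triI n + n

theorem two_mul_triI (n : Nat) : 2 * triI n = (n : Int) * ((n : Int) - 1) := by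
  induction n with
  | zero => simp [triI]
  | succ n ih =>
    rw [triI]
    push_cast
    linear_combination ih

theorem floordiv_triI (n : Nat) : PySem.Int.floordiv ((n : Int) * ((n : Int) - 1)) 2 = triI n := by
  rw [← two_mul_triI, PySem.Int.floordiv_eq_ediv_of_pos (by norm_num : (0:Int) < 2)]
  exact Int.mul_ediv_cancel_left _ (by norm_num)

theorem loop_eq (n : Nat) : ∀ (i ii l p u : Int), i - ii = n →
    IndexRangeFromILoop i ii l p u =
      (l + n * p - triI n, u + n * p - triI n - n) := by
  induction n with
  | zero =>
    intro i ii l p u h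
    rw [IndexRangeFromILoop]
    simp only [triI]
    rw [dif_neg (by omega)]
    norm_num
  | succ n ih =>
    intro i ii l p u h
    rw [IndexRangeFromILoop, dif_pos (by omega)]
    rw [ih i (ii + 1) _ _ _ (by omega)]
    rw [triI]
    push_cast
    simp only [Prod.mk.injEq]
    constructor <;> ring

-- ===== VERDICT (by name: the statement is the Claim_ definition above) =====
theorem IndexRangeFromI_spec : Claim_equal_IndexRangeFromI := by
  intro i N _
  unfold Spec_IndexRangeFromI IndexRangeFromI IndexRangeFromI_alt
  by_cases hi : 0 < i
  · have hn : i - 0 = ((i.toNat : Nat) : Int) := by omega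
    have hflo : PySem.Int.floordiv (i * (i - 1)) 2 = triI i.toNat := by
      rw [show i = ((i.toNat : Nat) : Int) from by omega]
      exact floordiv_triI i.toNat
    rw [loop_eq i.toNat i 0 0 (N - 1) (N - 1) hn]
    simp only [if_pos hi, hflo]
    have hcast : ((i.toNat : Nat) : Int) = i := by omega
    rw [hcast]
    ring_nf
  · rw [IndexRangeFromILoop, dif_neg (by omega), if_neg hi]
    simp
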